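-- pv_equiv track=rewrite | github.com/davidting0918/python-leetcode-solutions | 1395-count-number-of-teams.py | numTeams_on3
-- ===== SOURCE A (Python) =====
-- def numTeams_on3(rating: list[int]) -> int:
--     count = 0
--     for first in range(len(rating)):
--         for second in range(first + 1, len(rating)):
--             for third in range(second + 1, len(rating)):
--                 if rating[first] < rating[second] < rating[third] or rating[first] > rating[second] > rating[third]:
--                     count += 1
--     return count
-- ===== SOURCE B (Python) =====
-- def numTeams_on3(rating: list[int]) -> int:
--     n = len(rating)
--     count = 0
--     for j in range(n):
--         left_less = 0
--         left_greater = 0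
--         for i in range(j):
--             if rating[i] < rating[j]:
--                 left_less += 1
--             elif rating[i] > rating[j]:
--                 left_greater += 1
--         right_greater = 0
--         right_less = 0
--         for k in range(j + 1, n):
--             if rating[k] > rating[j]:
--                 right_greater += 1
--             elif rating[k] < rating[j]:
--                 right_less += 1
--         count += left_less * right_greater + left_greater * right_less
--     return count
-- ===== Notes on version B (the rewrite author's own statement) =====
-- stated objective: faster
-- what changed: Replaced the triple nested loop over all index triples by a single pass over middle indices that counts smaller/larger elements on each side and sums the products.
import Mathlib
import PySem

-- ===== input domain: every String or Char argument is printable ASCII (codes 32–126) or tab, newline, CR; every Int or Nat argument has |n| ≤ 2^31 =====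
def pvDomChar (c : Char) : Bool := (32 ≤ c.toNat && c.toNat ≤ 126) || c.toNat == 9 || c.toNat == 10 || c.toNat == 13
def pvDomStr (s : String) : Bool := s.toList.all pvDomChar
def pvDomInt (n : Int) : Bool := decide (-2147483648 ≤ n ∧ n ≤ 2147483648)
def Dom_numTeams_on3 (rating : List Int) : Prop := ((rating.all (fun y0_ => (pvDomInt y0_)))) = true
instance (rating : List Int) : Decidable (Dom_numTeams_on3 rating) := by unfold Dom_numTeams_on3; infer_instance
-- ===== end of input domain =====

-- B replaces A's O(n^3) scan of all index triples by an O(n^2) pass that, for each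
-- middle index, counts smaller/larger neighbours on each side and sums the products.

-- ===== PORT A =====
def numTeams_on3 (rating : List Int) : Int :=
  (PySem.List.pyRange 0 (rating.length : Int) 1).foldl (fun count first =>
    (PySem.List.pyRange (first + 1) (rating.length : Int) 1).foldl (fun count second =>
      (PySem.List.pyRange (second + 1) (rating.length : Int) 1).foldl (fun count third =>
        if (PySem.List.pyGetD rating first 0 < PySem.List.pyGetD rating second 0 ∧
            PySem.List.pyGetD rating second 0 < PySem.List.pyGetD rating third 0) ∨
           (PySem.List.pyGetD rating first 0 > PySem.List.pyGetD rating second 0 ∧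
            PySem.List.pyGetD rating second 0 > PySem.List.pyGetD rating third 0)
        then count + 1 else count) count) count) 0

-- ===== PORT B =====
def numTeams_on3_alt (rating : List Int) : Int :=
  (PySem.List.pyRange 0 (rating.length : Int) 1).foldl (fun count j =>
    let lp := (PySem.List.pyRange 0 j 1).foldl (fun p i =>
      if PySem.List.pyGetD rating i 0 < PySem.List.pyGetD rating j 0 then (p.1 + 1, p.2)
      else if PySem.List.pyGetD rating i 0 > PySem.List.pyGetD rating j 0 then (p.1, p.2 + 1)
      else p) ((0 : Int), (0 : Int))
    let rp := (PySem.List.pyRange (j + 1) (rating.length : Int) 1).foldl (fun p k =>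
      if PySem.List.pyGetD rating k 0 > PySem.List.pyGetD rating j 0 then (p.1 + 1, p.2)
      else if PySem.List.pyGetD rating k 0 < PySem.List.pyGetD rating j 0 then (p.1, p.2 + 1)
      else p) ((0 : Int), (0 : Int))
    count + (lp.1 * rp.1 + lp.2 * rp.2)) 0

-- ===== PRECONDITION & SPEC =====
def Spec_numTeams_on3 (rating : List Int) (out : Int) : Prop := out = numTeams_on3_alt rating
instance (rating : List Int) (out : Int) : Decidable (Spec_numTeams_on3 rating out) := by unfold Spec_numTeams_on3; infer_instance

-- ===== CLAIM (what is proved, stated in full; the proofs are below) =====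
def Claim_equal_numTeams_on3 : Prop := ∀ (rating : List Int), Dom_numTeams_on3 rating → Spec_numTeams_on3 rating (numTeams_on3 rating)

-- ===== LEMMAS AND PROOFS =====

-- A fold that only adds a per-element amount is the initial value plus the sum.
theorem pvFoldlAddSum (l : List Int) (f : Int → Int → Int) (S : Int → Int)
    (hf : ∀ acc x, f acc x = acc + S x) :
    ∀ init : Int, l.foldl f init = init + (l.map S).sum := by
  induction l with
  | nil => intro init; simp
  | cons a t ih => intro init; simp [hf, ih, add_assoc]

-- A fold over a pair that adds per-element amounts componentwise.
theorem pvFoldlPair (l : List Int) (f : Int × Int → Int → Int × Int) (g1 g2 : Int → Int)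
    (hf : ∀ p x, f p x = (p.1 + g1 x, p.2 + g2 x)) :
    ∀ init : Int × Int, l.foldl f init = (init.1 + (l.map g1).sum, init.2 + (l.map g2).sum) := by
  induction l with
  | nil => intro init; simp
  | cons a t ih => intro init; simp [hf, ih, add_assoc]

theorem pvIcoSplitLeft (a b : Int) (h : a < b) :
    Finset.Ico a b = insert a (Finset.Ico (a + 1) b) := by
  ext x; simp [Finset.mem_Ico]; omega

-- sum over list(range(a,b)) equals the Finset.Ico sum.
theorem pvSumPyRange (S : Int → Int) (a b : Int) :
    ((PySem.List.pyRange a b 1).map S).sum = ∑ x ∈ Finset.Ico a b, S x := by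
  by_cases hab : b ≤ a
  · rw [PySem.List.pyRange_one_eq_nil hab, Finset.Ico_eq_empty (by omega)]; simp
  · rw [not_le] at hab
    have hm : (b - a).toNat ≠ 0 := by omega
    obtain ⟨m, hm'⟩ : ∃ m, (b - a).toNat = m := ⟨_, rfl⟩
    clear hm
    induction m generalizing a with
    | zero => omega
    | succ m ih =>
      rw [PySem.List.pyRange_one_cons hab, pvIcoSplitLeft a b hab]
      rw [Finset.sum_insert (by simp [Finset.mem_Ico])]
      simp only [List.map_cons, List.sum_cons]
      by_cases h2 : a + 1 < b
      · rw [ih (a + 1) h2 (by omega)]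
      · have : b = a + 1 := by omega
        subst this
        rw [PySem.List.pyRange_one_eq_nil (by omega), Finset.Ico_eq_empty (by omega)]; simp

-- interchange of the two index sums over 0 ≤ i < j < n.
theorem pvSumTriComm (n : Int) (g : Int → Int → Int) :
    ∑ i ∈ Finset.Ico 0 n, ∑ j ∈ Finset.Ico (i + 1) n, g i j
      = ∑ j ∈ Finset.Ico 0 n, ∑ i ∈ Finset.Ico 0 j, g i j := by
  have L : ∀ i ∈ Finset.Ico (0 : Int) n,
      ∑ j ∈ Finset.Ico (i + 1) n, g i j
        = ∑ j ∈ Finset.Ico 0 n, if i < j then g i j else 0 := by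
    intro i hi
    simp only [Finset.mem_Ico] at hi
    rw [show Finset.Ico (i + 1) n = (Finset.Ico 0 n).filter (fun j => i < j) from by
          ext x; simp [Finset.mem_Ico, Finset.mem_filter]; omega,
        Finset.sum_filter]
  have R : ∀ j ∈ Finset.Ico (0 : Int) n,
      ∑ i ∈ Finset.Ico 0 j, g i j
        = ∑ i ∈ Finset.Ico 0 n, if i < j then g i j else 0 := by
    intro j hj
    simp only [Finset.mem_Ico] at hj
    rw [show Finset.Ico 0 j = (Finset.Ico 0 n).filter (fun i => i < j) from by
          ext x; simp [Finset.mem_Ico]; omega,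
        Finset.sum_filter]
  rw [Finset.sum_congr rfl L, Finset.sum_congr rfl R, Finset.sum_comm]

theorem pvIteAdd (c : Prop) [inst : Decidable c] (acc : Int) :
    (if c then acc + 1 else acc) = acc + (if c then (1 : Int) else 0) := by
  split <;> omega

-- 0/1 indicators used throughout.
theorem pvIndicatorSplit (a b c : Int) :
    (if (a < b ∧ b < c) ∨ (a > b ∧ b > c) then (1 : Int) else 0)
      = (if a < b then (1 : Int) else 0) * (if b < c then (1 : Int) else 0)
        + (if a > b then (1 : Int) else 0) * (if b > c then (1 : Int) else 0) := by
  split_ifs <;> simp_all <;> omega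

-- the core combinatorial identity, for an arbitrary value function r.
theorem pvCoreIdentity (n : Int) (r : Int → Int) :
    (∑ i ∈ Finset.Ico 0 n, ∑ j ∈ Finset.Ico (i + 1) n, ∑ k ∈ Finset.Ico (j + 1) n,
        if (r i < r j ∧ r j < r k) ∨ (r i > r j ∧ r j > r k) then (1 : Int) else 0)
      = ∑ j ∈ Finset.Ico 0 n,
          ((∑ i ∈ Finset.Ico 0 j, if r i < r j then (1 : Int) else 0) *
             (∑ k ∈ Finset.Ico (j + 1) n, if r j < r k then (1 : Int) else 0)
           + (∑ i ∈ Finset.Ico 0 j, if r i > r j then (1 : Int) else 0) *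
             (∑ k ∈ Finset.Ico (j + 1) n, if r j > r k then (1 : Int) else 0)) := by
  have step1 : ∀ i j : Int,
      (∑ k ∈ Finset.Ico (j + 1) n,
          if (r i < r j ∧ r j < r k) ∨ (r i > r j ∧ r j > r k) then (1 : Int) else 0)
        = (if r i < r j then (1 : Int) else 0) *
            (∑ k ∈ Finset.Ico (j + 1) n, if r j < r k then (1 : Int) else 0)
          + (if r i > r j then (1 : Int) else 0) *
            (∑ k ∈ Finset.Ico (j + 1) n, if r j > r k then (1 : Int) else 0) := by
    intro i j
    rw [Finset.mul_sum, Finset.mul_sum, ← Finset.sum_add_distrib]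
    exact Finset.sum_congr rfl fun k _ => pvIndicatorSplit (r i) (r j) (r k)
  calc
    (∑ i ∈ Finset.Ico 0 n, ∑ j ∈ Finset.Ico (i + 1) n, ∑ k ∈ Finset.Ico (j + 1) n,
        if (r i < r j ∧ r j < r k) ∨ (r i > r j ∧ r j > r k) then (1 : Int) else 0)
        = ∑ i ∈ Finset.Ico 0 n, ∑ j ∈ Finset.Ico (i + 1) n,
            ((if r i < r j then (1 : Int) else 0) *
               (∑ k ∈ Finset.Ico (j + 1) n, if r j < r k then (1 : Int) else 0)
             + (if r i > r j then (1 : Int) else 0) *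
               (∑ k ∈ Finset.Ico (j + 1) n, if r j > r k then (1 : Int) else 0)) := by
          exact Finset.sum_congr rfl fun i _ => Finset.sum_congr rfl fun j _ => step1 i j
    _ = ∑ j ∈ Finset.Ico 0 n, ∑ i ∈ Finset.Ico 0 j,
            ((if r i < r j then (1 : Int) else 0) *
               (∑ k ∈ Finset.Ico (j + 1) n, if r j < r k then (1 : Int) else 0)
             + (if r i > r j then (1 : Int) else 0) *
               (∑ k ∈ Finset.Ico (j + 1) n, if r j > r k then (1 : Int) else 0)) :=
          pvSumTriComm n _
    _ = _ := by
          refine Finset.sum_congr rfl fun j _ => ?_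
          rw [Finset.sum_add_distrib, ← Finset.sum_mul, ← Finset.sum_mul]

-- A's fold equals the triple Ico sum.
theorem pvA_eq_sum (rating : List Int) :
    numTeams_on3 rating
      = ∑ i ∈ Finset.Ico 0 (rating.length : Int), ∑ j ∈ Finset.Ico (i + 1) (rating.length : Int),
          ∑ k ∈ Finset.Ico (j + 1) (rating.length : Int),
          if (PySem.List.pyGetD rating i 0 < PySem.List.pyGetD rating j 0 ∧
              PySem.List.pyGetD rating j 0 < PySem.List.pyGetD rating k 0) ∨
             (PySem.List.pyGetD rating i 0 > PySem.List.pyGetD rating j 0 ∧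
              PySem.List.pyGetD rating j 0 > PySem.List.pyGetD rating k 0)
          then (1 : Int) else 0 := by
  unfold numTeams_on3
  rw [pvFoldlAddSum _ _
      (fun first => ∑ j ∈ Finset.Ico (first + 1) (rating.length : Int),
          ∑ k ∈ Finset.Ico (j + 1) (rating.length : Int),
          if (PySem.List.pyGetD rating first 0 < PySem.List.pyGetD rating j 0 ∧
              PySem.List.pyGetD rating j 0 < PySem.List.pyGetD rating k 0) ∨
             (PySem.List.pyGetD rating first 0 > PySem.List.pyGetD rating j 0 ∧
              PySem.List.pyGetD rating j 0 > PySem.List.pyGetD rating k 0)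
          then (1 : Int) else 0)
      ?_ 0, pvSumPyRange, zero_add]
  intro acc first
  rw [pvFoldlAddSum _ _
      (fun second => ∑ k ∈ Finset.Ico (second + 1) (rating.length : Int),
          if (PySem.List.pyGetD rating first 0 < PySem.List.pyGetD rating second 0 ∧
              PySem.List.pyGetD rating second 0 < PySem.List.pyGetD rating k 0) ∨
             (PySem.List.pyGetD rating first 0 > PySem.List.pyGetD rating second 0 ∧
              PySem.List.pyGetD rating second 0 > PySem.List.pyGetD rating k 0)
          then (1 : Int) else 0)
      ?_ acc, pvSumPyRange]
  intro acc2 second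
  rw [pvFoldlAddSum _ _
      (fun third =>
          if (PySem.List.pyGetD rating first 0 < PySem.List.pyGetD rating second 0 ∧
              PySem.List.pyGetD rating second 0 < PySem.List.pyGetD rating third 0) ∨
             (PySem.List.pyGetD rating first 0 > PySem.List.pyGetD rating second 0 ∧
              PySem.List.pyGetD rating second 0 > PySem.List.pyGetD rating third 0)
          then (1 : Int) else 0)
      ?_ acc2, pvSumPyRange]
  intro acc3 third
  exact pvIteAdd _ acc3

-- B's fold equals the per-middle-index product sum.
theorem pvB_eq_sum (rating : List Int) :
    numTeams_on3_alt rating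
      = ∑ j ∈ Finset.Ico 0 (rating.length : Int),
          ((∑ i ∈ Finset.Ico 0 j, if PySem.List.pyGetD rating i 0 < PySem.List.pyGetD rating j 0 then (1 : Int) else 0) *
             (∑ k ∈ Finset.Ico (j + 1) (rating.length : Int), if PySem.List.pyGetD rating j 0 < PySem.List.pyGetD rating k 0 then (1 : Int) else 0)
           + (∑ i ∈ Finset.Ico 0 j, if PySem.List.pyGetD rating i 0 > PySem.List.pyGetD rating j 0 then (1 : Int) else 0) *
             (∑ k ∈ Finset.Ico (j + 1) (rating.length : Int), if PySem.List.pyGetD rating j 0 > PySem.List.pyGetD rating k 0 then (1 : Int) else 0)) := by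
  unfold numTeams_on3_alt
  rw [pvFoldlAddSum _ _ _ ?_ 0, pvSumPyRange, zero_add]
  intro acc j
  simp only []
  rw [pvFoldlPair _ _
      (fun i => if PySem.List.pyGetD rating i 0 < PySem.List.pyGetD rating j 0 then (1 : Int) else 0)
      (fun i => if PySem.List.pyGetD rating i 0 > PySem.List.pyGetD rating j 0 then (1 : Int) else 0)
      ?hl ((0 : Int), (0 : Int)),
     pvFoldlPair _ _
      (fun k => if PySem.List.pyGetD rating j 0 < PySem.List.pyGetD rating k 0 then (1 : Int) else 0)
      (fun k => if PySem.List.pyGetD rating j 0 > PySem.List.pyGetD rating k 0 then (1 : Int) else 0)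
      ?hr ((0 : Int), (0 : Int))]
  · simp only [pvSumPyRange, zero_add]
  case hl =>
    intro p x
    by_cases h1 : PySem.List.pyGetD rating x 0 < PySem.List.pyGetD rating j 0 <;>
      by_cases h2 : PySem.List.pyGetD rating x 0 > PySem.List.pyGetD rating j 0 <;>
        simp [h1, h2] <;> omega
  case hr =>
    intro p x
    by_cases h1 : PySem.List.pyGetD rating j 0 < PySem.List.pyGetD rating x 0 <;>
      by_cases h2 : PySem.List.pyGetD rating j 0 > PySem.List.pyGetD rating x 0 <;>
        simp [h1, h2, gt_iff_lt] <;> omega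

-- ===== VERDICT (by name: the statement is the Claim_ definition above) =====
theorem numTeams_on3_spec : Claim_equal_numTeams_on3 := by
  intro rating _
  unfold Spec_numTeams_on3
  rw [pvA_eq_sum, pvB_eq_sum]
  exact pvCoreIdentity (rating.length : Int) (fun i => PySem.List.pyGetD rating i 0)
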